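-- pv_equiv track=rewrite | github.com/mathieultc/ICS4u-Classwork | algorithm/algorithm.py | changePi
-- ===== SOURCE A (Python) =====
-- def changePi(word: str) -> str:
--     n = len(word)
--
--     if word == "pi":
--         return '3.14'
--
--     elif n == 0:
--         return ''
--
--     elif word[0:2] == 'pi':
--         return '3.14' + changePi(word[2: n])
--
--     else:
--         return word[0] + changePi(word[1: n])
-- ===== SOURCE B (Python) =====
-- def changePi(word: str) -> str:
--     res = []
--     i = 0
--     while i < len(word):
--         if word[i:i+2] == 'pi':
--             res.append('3.14')
--             i += 2
--         else:
--             res.append(word[i])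
--             i += 1
--     return ''.join(res)
-- ===== Notes on version B (the rewrite author's own statement) =====
-- stated objective: faster
-- what changed: Replaced A's recursion (one Python call frame and a fresh string concatenation per character) with an iterative index scanner that collects chunks in a list and joins once at the end.
import Mathlib
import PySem

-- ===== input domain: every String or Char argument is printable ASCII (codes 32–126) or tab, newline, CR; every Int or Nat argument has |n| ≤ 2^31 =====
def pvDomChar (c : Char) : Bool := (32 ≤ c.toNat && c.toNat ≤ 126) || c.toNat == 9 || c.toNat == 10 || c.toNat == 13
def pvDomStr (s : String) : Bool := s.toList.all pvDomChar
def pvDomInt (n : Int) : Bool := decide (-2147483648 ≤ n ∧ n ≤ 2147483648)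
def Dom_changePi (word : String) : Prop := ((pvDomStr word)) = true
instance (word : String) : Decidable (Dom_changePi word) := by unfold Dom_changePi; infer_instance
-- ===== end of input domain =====

-- B replaces A's recursion (new string concatenation per character) by an iterative
-- scanner that appends chunks to a list and joins once at the end (objective: alternative).

-- ===== PORT A =====
-- A works on the string; we transliterate over its character list.
-- word[0:2] / word[2:n] / word[1:n] with these nonnegative in-range bounds are exactly
-- List.take 2 / List.drop 2 / List.drop 1 on the character list.
def changePiA (cs : List Char) : List Char :=
  if cs = ['p', 'i'] then ['3', '.', '1', '4']
  else if cs.length = 0 then []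
  else if cs.take 2 = ['p', 'i'] then ['3', '.', '1', '4'] ++ changePiA (cs.drop 2)
  else cs.take 1 ++ changePiA (cs.drop 1)
termination_by cs.length
decreasing_by
  · simp; omega
  · simp; omega

def changePi (word : String) : String := String.ofList (changePiA word.toList)

-- ===== PORT B =====
-- The while loop over index i: the not-yet-scanned suffix word[i:] is the first argument,
-- acc is the Python list `res` (newest chunk first; `''.join(res)` = flatten of its reverse).
-- word[i:i+2] == 'pi' is `take 2 = ['p','i']` on the suffix; i += 2 / i += 1 drop 2 / 1 chars.
def changePiB (cs : List Char) (acc : List (List Char)) : List (List Char) :=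
  match cs with
  | [] => acc
  | c :: rest =>
    if (c :: rest).take 2 = ['p', 'i'] then
      changePiB ((c :: rest).drop 2) (['3', '.', '1', '4'] :: acc)
    else
      changePiB rest ([c] :: acc)
termination_by cs.length
decreasing_by
  · simp
  · simp

def changePi_alt (word : String) : String :=
  String.ofList ((changePiB word.toList []).reverse.flatten)

-- ===== PRECONDITION & SPEC =====
def Spec_changePi (word : String) (out : String) : Prop := out = changePi_alt word
instance (word : String) (out : String) : Decidable (Spec_changePi word out) := by unfold Spec_changePi; infer_instance

-- ===== CLAIM (what is proved, stated in full; the proofs are below) =====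
def Claim_equal_changePi : Prop := ∀ (word : String), Dom_changePi word → Spec_changePi word (changePi word)

-- ===== LEMMAS AND PROOFS =====

lemma changePiB_acc (n : ℕ) : ∀ (cs : List Char) (acc : List (List Char)), cs.length ≤ n →
    changePiB cs acc = changePiB cs [] ++ acc := by
  induction n with
  | zero =>
    intro cs acc h
    have : cs = [] := List.eq_nil_of_length_eq_zero (Nat.le_zero.mp h)
    subst this; simp [changePiB]
  | succ n ih =>
    intro cs acc h
    match cs with
    | [] => simp [changePiB]
    | c :: rest =>
      by_cases hpi : (c :: rest).take 2 = ['p', 'i']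
      · rw [changePiB, if_pos hpi, changePiB, if_pos hpi,
          ih _ _ (by simp at h ⊢; omega), ih _ [_] (by simp at h ⊢; omega)]
        simp
      · rw [changePiB, if_neg hpi, changePiB, if_neg hpi,
          ih _ _ (by simp at h; omega), ih _ [_] (by simp at h; omega)]
        simp

lemma changePi_main (n : ℕ) : ∀ cs : List Char, cs.length ≤ n →
    (changePiB cs []).reverse.flatten = changePiA cs := by
  induction n with
  | zero =>
      intro cs h
      have : cs = [] := List.eq_nil_of_length_eq_zero (Nat.le_zero.mp h)
      subst this; simp [changePiA, changePiB]
  | succ n ih =>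
      intro cs h
      match cs with
      | [] => simp [changePiA, changePiB]
      | c :: rest =>
        have hlen : (c :: rest).length ≠ 0 := by simp
        by_cases hpi : (c :: rest).take 2 = ['p', 'i']
        · rw [changePiB, if_pos hpi, changePiB_acc n _ _ (by simp at h ⊢; omega)]
          have hB : ((changePiB ((c :: rest).drop 2) [] ++ [['3', '.', '1', '4']]).reverse).flatten
              = ['3', '.', '1', '4'] ++ changePiA ((c :: rest).drop 2) := by
            simp [List.reverse_append, ih rest.tail (show rest.tail.length ≤ n by simp at h ⊢; omega)]
          rw [hB]
          by_cases he : rest = ['i']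
          · subst he
            have hc : c = 'p' := by simpa using hpi
            subst hc
            simp [changePiA]
          · have h1 : c :: rest ≠ ['p', 'i'] := by
              intro hab
              have : c = 'p' ∧ rest = ['i'] := by simpa using hab
              exact he this.2
            have hA : changePiA (c :: rest) = ['3', '.', '1', '4'] ++ changePiA ((c :: rest).drop 2) := by
              rw [changePiA, if_neg h1, if_neg hlen, if_pos hpi]
            rw [hA]
        · rw [changePiB, if_neg hpi, changePiB_acc n _ _ (by simp at h; omega)]
          have hB : ((changePiB rest [] ++ [[c]]).reverse).flatten
              = [c] ++ changePiA rest := by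
            simp [List.reverse_append, ih _ (show rest.length ≤ n by simp at h; omega)]
          rw [hB]
          have h1 : c :: rest ≠ ['p', 'i'] := by
            intro hab
            exact hpi (by rw [hab]; decide)
          have hA : changePiA (c :: rest) = List.take 1 (c :: rest) ++ changePiA ((c :: rest).drop 1) := by
            rw [changePiA, if_neg h1, if_neg hlen, if_neg hpi]
          rw [hA]
          simp

-- ===== VERDICT (by name: the statement is the Claim_ definition above) =====
theorem changePi_spec : Claim_equal_changePi := by
  intro word _
  unfold Spec_changePi changePi changePi_alt
  rw [changePi_main word.toList.length word.toList le_rfl]
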